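-- pv_equiv track=rewrite | github.com/Ronaldo-OlSi/Calculadora-de-Matrizes | operacoes.py | prenche_par
-- ===== SOURCE A (Python) =====
-- def matriz_nula(nlinhas, ncols):
--     M = []
--     for i in range(nlinhas):
--         linha = [0] * ncols
--         M.append(linha)
--     return M
--
-- def prenche_par(M):
--
--     nlinhas = len(M)
--     ncolunas = len(M[0])
--     Z = matriz_nula(ncolunas, nlinhas)
--     for i in range(0, nlinhas, 2):
--         for j in range(ncolunas):
--                 Z[j][i] = 2
--     return Z
-- ===== SOURCE B (Python) =====
-- def prenche_par(M):
--     nlinhas = len(M)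
--     ncolunas = len(M[0])
--     linha = ([2, 0] * ((nlinhas + 1) // 2))[:nlinhas]
--     return [list(linha) for _ in range(ncolunas)]
-- ===== Notes on version B (the rewrite author's own statement) =====
-- stated objective: alternative
-- what changed: B never allocates zeros, tests parity or writes per cell: it tiles the periodic pattern [2,0] enough times, slices it to the row length, and replicates that one precomputed row ncolunas times, whereas A zero-initialises a matrix and overwrites the even positions with a nested loop.
-- outside the precondition, e.g. on prenche_par([]): A raises IndexError, B raises IndexError
import Mathlib
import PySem

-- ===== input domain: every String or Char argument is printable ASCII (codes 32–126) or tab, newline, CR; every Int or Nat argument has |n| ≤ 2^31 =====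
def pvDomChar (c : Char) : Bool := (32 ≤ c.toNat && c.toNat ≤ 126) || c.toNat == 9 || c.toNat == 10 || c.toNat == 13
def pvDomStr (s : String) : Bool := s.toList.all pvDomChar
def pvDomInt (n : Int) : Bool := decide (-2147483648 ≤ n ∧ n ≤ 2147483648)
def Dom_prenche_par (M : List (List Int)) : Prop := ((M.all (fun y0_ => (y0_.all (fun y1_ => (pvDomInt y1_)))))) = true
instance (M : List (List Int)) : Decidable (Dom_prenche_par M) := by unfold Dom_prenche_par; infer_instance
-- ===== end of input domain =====

-- B tiles the periodic pattern [2,0], slices it to the row length and replicates that one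
-- row, instead of A's zero-matrix allocation plus per-cell overwrite (objective: alternative).

-- ===== PORT A =====
def matriz_nula (nlinhas ncols : Int) : List (List Int) :=
  (PySem.List.pyRange 0 nlinhas 1).foldl
    (fun M _i => M ++ [PySem.List.pyRepeat [0] ncols]) []

-- Z[j][i] = 2: j and i are in-range non-negative indices here, so List.modify/List.set is exact.
def prenche_par (M : List (List Int)) : List (List Int) :=
  let nlinhas : Int := M.length
  -- M[0]: raises IndexError iff M = [] (excluded by Pre_); pyGet? returns none exactly there.
  let ncolunas : Int := (((PySem.List.pyGet? M 0).getD []).length : Int)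
  let Z := matriz_nula ncolunas nlinhas
  (PySem.List.pyRange 0 nlinhas 2).foldl (fun Z i =>
    (PySem.List.pyRange 0 ncolunas 1).foldl (fun Z j =>
      Z.modify j.toNat (fun row => row.set i.toNat 2)) Z) Z

-- ===== PORT B =====
def prenche_par_alt (M : List (List Int)) : List (List Int) :=
  let nlinhas : Int := M.length
  let ncolunas : Int := (((PySem.List.pyGet? M 0).getD []).length : Int)
  let linha := PySem.List.slice
    (PySem.List.pyRepeat [2, 0] (PySem.Int.floordiv (nlinhas + 1) 2)) none (some nlinhas)
  (PySem.List.pyRange 0 ncolunas 1).map (fun _ => linha)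

-- ===== PRECONDITION & SPEC =====
-- A (and B) raise IndexError on M = [] at len(M[0]); Pre_ excludes exactly that input.
def Pre_prenche_par (M : List (List Int)) : Prop := M ≠ []
instance (M : List (List Int)) : Decidable (Pre_prenche_par M) := by unfold Pre_prenche_par; infer_instance
def pvWitness_prenche_par : List (List Int) := [[0]]

def Spec_prenche_par (M : List (List Int)) (out : List (List Int)) : Prop := out = prenche_par_alt M
instance (M : List (List Int)) (out : List (List Int)) : Decidable (Spec_prenche_par M out) := by unfold Spec_prenche_par; infer_instance

-- ===== CLAIM (what is proved, stated in full; the proofs are below) =====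
def Claim_equal_prenche_par : Prop := ∀ (M : List (List Int)), Dom_prenche_par M → Pre_prenche_par M → Spec_prenche_par M (prenche_par M)

-- ===== LEMMAS AND PROOFS =====

theorem pv_matriz_nula (a b : Int) :
    matriz_nula a b = List.replicate a.toNat (List.replicate b.toNat 0) := by
  simp [matriz_nula, PySem.List.length_pyRange_one,
    PySem.List.pyRepeat_singleton]

theorem pv_set_foldl_getElem? (ls : List Int) (h0 : ∀ i ∈ ls, 0 ≤ i)
    (r : List Int) (k : Nat) :
    (ls.foldl (fun r i => r.set i.toNat 2) r)[k]? =
      if (k : Int) ∈ ls ∧ k < r.length then some 2 else r[k]? := by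
  induction ls generalizing r with
  | nil => simp
  | cons i ls ih =>
    have hi : 0 ≤ i := h0 i (List.mem_cons_self ..)
    have h0' : ∀ j ∈ ls, 0 ≤ j := fun j hj => h0 j (List.mem_cons_of_mem _ hj)
    rw [List.foldl_cons, ih h0', List.length_set, List.getElem?_set]
    by_cases hk : (k : Int) = i
    · have ht : i.toNat = k := by omega
      by_cases hl : k < r.length
      · simp [ht, hl, hk, List.mem_cons]
      · have hnone : r[k]? = none := by rw [List.getElem?_eq_none_iff]; omega
        simp [ht, hl, hk, List.mem_cons]
    · have ht : i.toNat ≠ k := by omega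
      simp [ht, hk, List.mem_cons]

theorem pv_modify_foldl_getElem? {α : Type} (ls : List Int)
    (h0 : ∀ j ∈ ls, 0 ≤ j) (hnd : ls.Nodup) (f : α → α) (Z : List α) (k : Nat) :
    (ls.foldl (fun Z j => Z.modify j.toNat f) Z)[k]? =
      if (k : Int) ∈ ls then Z[k]?.map f else Z[k]? := by
  induction ls generalizing Z with
  | nil => simp
  | cons j ls ih =>
    have hj : 0 ≤ j := h0 j (List.mem_cons_self ..)
    have h0' : ∀ i ∈ ls, 0 ≤ i := fun i hi => h0 i (List.mem_cons_of_mem _ hi)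
    have hnd' : ls.Nodup := hnd.of_cons
    have hjmem : j ∉ ls := (List.nodup_cons.mp hnd).1
    rw [List.foldl_cons, ih h0' hnd', List.getElem?_modify]
    by_cases hk : (k : Int) = j
    · have ht : j.toNat = k := by omega
      simp only [ht, hk, List.mem_cons]
      cases Z[k]? <;> simp [hjmem]
    · have ht : j.toNat ≠ k := by omega
      simp only [ht, List.mem_cons, if_false]
      by_cases hm : (k : Int) ∈ ls <;> simp [hm, hk]

theorem pv_inner_map (c : Nat) (f : List Int → List Int) (Z : List (List Int))
    (h : Z.length = c) :
    (PySem.List.pyRange 0 (c : Int) 1).foldl (fun Z j => Z.modify j.toNat f) Z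
      = Z.map f := by
  apply List.ext_getElem?
  intro k
  rw [pv_modify_foldl_getElem? _ (fun j hj => ((PySem.List.mem_pyRange_one).mp hj).1)
      (PySem.List.nodup_pyRange_one ..) f Z k]
  rw [List.getElem?_map]
  by_cases hk : k < c
  · have : (k : Int) ∈ PySem.List.pyRange 0 (c : Int) 1 := by
      rw [PySem.List.mem_pyRange_one]; omega
    simp [this]
  · have : (k : Int) ∉ PySem.List.pyRange 0 (c : Int) 1 := by
      rw [PySem.List.mem_pyRange_one]; omega
    have hz : Z[k]? = none := by
      rw [List.getElem?_eq_none_iff]; omega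
    simp [this, hz]

theorem pv_outer_foldl (ls : List Int) (c : Nat) (r : List Int) :
    ls.foldl (fun Z i =>
        (PySem.List.pyRange 0 (c : Int) 1).foldl
          (fun Z j => Z.modify j.toNat (fun row => row.set i.toNat 2)) Z)
      (List.replicate c r)
      = List.replicate c (ls.foldl (fun r i => r.set i.toNat 2) r) := by
  induction ls generalizing r with
  | nil => simp
  | cons i ls ih =>
    simp only [List.foldl_cons]
    rw [pv_inner_map c _ _ (by simp), List.map_replicate, ih]

theorem pv_tile_getElem? (m k : Nat) :
    ((List.replicate m ([2, 0] : List Int)).flatten)[k]? =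
      if k < 2 * m then some (if k % 2 = 0 then 2 else 0) else none := by
  induction m generalizing k with
  | zero => simp
  | succ m ih =>
    rw [List.replicate_succ, List.flatten_cons]
    match k with
    | 0 => simp
    | 1 => simp; omega
    | (k + 2) =>
      have : ([2, 0] ++ (List.replicate m ([2, 0] : List Int)).flatten)[k + 2]? =
          ((List.replicate m ([2, 0] : List Int)).flatten)[k]? := by
        rw [List.getElem?_append_right (by simp)]
        simp
      rw [this, ih]
      have h2 : (k + 2) % 2 = k % 2 := by omega
      by_cases hk : k < 2 * m <;> simp [hk, h2] <;> omega

-- A's sparse fill of a zero row equals B's tiled-and-sliced periodic row.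
theorem pv_row (n : Nat) :
    (PySem.List.pyRange 0 (n : Int) 2).foldl (fun r i => r.set i.toNat 2)
        (List.replicate n 0)
      = ((List.replicate ((n + 1) / 2) ([2, 0] : List Int)).flatten).take n := by
  apply List.ext_getElem?
  intro k
  have h0 : ∀ i ∈ PySem.List.pyRange 0 (n : Int) 2, 0 ≤ i := by
    intro i hi
    exact ((PySem.List.mem_pyRange_iff_of_pos (by norm_num) i).mp hi).1
  rw [pv_set_foldl_getElem? _ h0, List.getElem?_take, pv_tile_getElem?]
  rw [List.length_replicate]
  by_cases hk : k < n
  · have hlt : k < 2 * ((n + 1) / 2) := by omega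
    by_cases he : k % 2 = 0
    · have hmem : (k : Int) ∈ PySem.List.pyRange 0 (n : Int) 2 := by
        rw [PySem.List.mem_pyRange_iff_of_pos (by norm_num)]
        refine ⟨by omega, by exact_mod_cast hk, ?_⟩
        omega
      simp [hmem, hk, hlt, he]
    · have hmem : (k : Int) ∉ PySem.List.pyRange 0 (n : Int) 2 := by
        rw [PySem.List.mem_pyRange_iff_of_pos (by norm_num)]
        intro h
        exact absurd (by omega : k % 2 = 0) he
      simp [hmem, hk, hlt, he]
  · simp [hk]

-- ===== VERDICT (by name: the statement is the Claim_ definition above) =====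
theorem prenche_par_spec : Claim_equal_prenche_par := by
  intro M _ hpre
  unfold Spec_prenche_par prenche_par prenche_par_alt
  cases M with
  | nil => exact absurd rfl hpre
  | cons r Ms =>
    have hget : PySem.List.pyGet? (r :: Ms) 0 = some r := by
      simp [PySem.List.pyGet?, PySem.List.pyIdx?]
    simp only [hget, Option.getD_some]
    rw [pv_matriz_nula]
    have hc : ((r.length : Int)).toNat = r.length := by omega
    have hn : (((r :: Ms).length : Int)).toNat = (r :: Ms).length := by omega
    have hfd : PySem.Int.floordiv (((r :: Ms).length : Int) + 1) 2
        = (((r :: Ms).length + 1) / 2 : Nat) := by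
      exact_mod_cast PySem.Int.floordiv_natCast ((r :: Ms).length + 1) 2
    rw [hc, hn, pv_outer_foldl, pv_row]
    simp only [PySem.List.pyRepeat, hfd, Int.toNat_natCast]
    rw [PySem.List.slice_to_natCast, List.map_const', PySem.List.length_pyRange_one]
    norm_num
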